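-- pv_equiv track=rewrite | github.com/kunamax/Static-Cod-Analyzer | code_analyzer.py | S002
-- ===== SOURCE A (Python) =====
-- def S002(line):
--     whitespace = 0
--     first = False
--     for index, char in enumerate(line):
--         if char == ' ':
--             if index == 0:
--                 first = True
--             whitespace += 1
--         if whitespace != 0 and char != ' ' and first:
--             if whitespace % 4 == 0:
--                 return False
--             else: return True
-- ===== SOURCE B (Python) =====
-- def S002(line):
--     stripped = line.lstrip(' ')
--     whitespace = len(line) - len(stripped)
--     if whitespace == 0 or stripped == '':
--         return None
--     return whitespace % 4 != 0
-- ===== Notes on version B (the rewrite author's own statement) =====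
-- stated objective: idiomatic
-- what changed: Replaces A's stateful per-character scan (index/first-flag/counter with early return) by a closed-form computation: lstrip the leading spaces once and decide from the stripped length.
import Mathlib
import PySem

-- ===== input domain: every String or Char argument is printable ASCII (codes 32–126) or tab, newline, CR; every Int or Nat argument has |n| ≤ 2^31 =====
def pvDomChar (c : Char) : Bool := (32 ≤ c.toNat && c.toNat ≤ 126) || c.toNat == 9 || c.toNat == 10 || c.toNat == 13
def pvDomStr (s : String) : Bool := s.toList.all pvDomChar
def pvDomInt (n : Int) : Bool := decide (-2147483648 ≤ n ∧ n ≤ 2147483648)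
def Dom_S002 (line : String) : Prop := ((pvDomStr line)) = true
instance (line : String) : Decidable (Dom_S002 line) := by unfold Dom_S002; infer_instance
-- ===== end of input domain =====

-- B replaces A's stateful per-character scan by a closed-form lstrip-length computation (idiomatic; same result).

-- ===== PORT A =====
-- the for-loop with early return, state (whitespace, first), index tracked for 'index == 0'
def S002_loop : List Char → Nat → Nat → Bool → Option Bool
  | [], _, _, _ => none
  | c :: rest, index, whitespace, first =>
    let first' := if c = ' ' ∧ index = 0 then true else first
    let whitespace' := if c = ' ' then whitespace + 1 else whitespace
    if whitespace' ≠ 0 ∧ c ≠ ' ' ∧ first' = true then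
      some (¬ (whitespace' % 4 = 0))
    else
      S002_loop rest (index + 1) whitespace' first'

def S002 (line : String) : Option Bool := S002_loop line.toList 0 0 false

-- ===== PORT B =====
def S002_alt (line : String) : Option Bool :=
  let stripped := line.toList.dropWhile (· == ' ')   -- line.lstrip(' ')
  let whitespace := line.toList.length - stripped.length
  if whitespace = 0 ∨ stripped = [] then none
  else some (¬ (whitespace % 4 = 0))

-- ===== PRECONDITION & SPEC =====
def Spec_S002 (line : String) (out : Option Bool) : Prop := out = S002_alt line
instance (line : String) (out : Option Bool) : Decidable (Spec_S002 line out) := by unfold Spec_S002; infer_instance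

-- ===== CLAIM (what is proved, stated in full; the proofs are below) =====
def Claim_equal_S002 : Prop := ∀ (line : String), Dom_S002 line → Spec_S002 line (S002 line)

-- ===== LEMMAS AND PROOFS =====

-- with first = false and index ≠ 0, the loop never returns
theorem S002_loop_false (l : List Char) (index whitespace : Nat) (h : index ≠ 0) :
    S002_loop l index whitespace false = none := by
  induction l generalizing index whitespace with
  | nil => rfl
  | cons c rest ih =>
    simp only [S002_loop, h, and_false, if_false, Bool.false_eq_true, and_false]
    exact ih _ _ (Nat.succ_ne_zero index)

-- with first = true, whitespace ≠ 0, index ≠ 0, the loop computes the closed form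
theorem S002_loop_true (l : List Char) (index whitespace : Nat)
    (hi : index ≠ 0) (hw : whitespace ≠ 0) :
    S002_loop l index whitespace true =
      (if l.dropWhile (· == ' ') = [] then none
       else some (decide (¬ ((whitespace + (l.length - (l.dropWhile (· == ' ')).length)) % 4 = 0)))) := by
  induction l generalizing index whitespace with
  | nil => simp [S002_loop, List.dropWhile]
  | cons c rest ih =>
    by_cases hc : c = ' '
    · subst hc
      simp only [S002_loop, ite_self, if_true, ne_eq, not_true_eq_false, false_and, and_false, if_false]
      rw [ih (index + 1) (whitespace + 1) (Nat.succ_ne_zero index) (Nat.succ_ne_zero whitespace)]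
      have hd : (' ' :: rest).dropWhile (· == ' ') = rest.dropWhile (· == ' ') := by
        simp [List.dropWhile]
      rw [hd]
      by_cases he : rest.dropWhile (· == ' ') = []
      · simp [he]
      · have harith : (' ' :: rest).length - (rest.dropWhile (· == ' ')).length
            = 1 + (rest.length - (rest.dropWhile (· == ' ')).length) := by
          have hle : (rest.dropWhile (· == ' ')).length ≤ rest.length :=
            List.length_dropWhile_le _ _
          simp only [List.length_cons]; omega
        rw [if_neg he, if_neg he, harith, ← Nat.add_assoc]
    · have hcb : (c == ' ') = false := beq_eq_false_iff_ne.mpr hc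
      simp only [S002_loop, hc, if_false, false_and]
      rw [if_pos (show whitespace ≠ 0 ∧ c ≠ ' ' ∧ True from ⟨hw, hc, trivial⟩)]
      have hd : (c :: rest).dropWhile (· == ' ') = c :: rest := by
        simp [List.dropWhile, hcb]
      rw [hd]
      simp

-- ===== VERDICT (by name: the statement is the Claim_ definition above) =====
theorem S002_spec : Claim_equal_S002 := by
  intro line _
  unfold Spec_S002 S002 S002_alt
  cases hl : line.toList with
  | nil => rfl
  | cons c rest =>
    by_cases hc : c = ' '
    · subst hc
      have step : S002_loop (' ' :: rest) 0 0 false = S002_loop rest 1 1 true := by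
        simp [S002_loop]
      rw [step, S002_loop_true rest 1 1 one_ne_zero one_ne_zero]
      have hd : (' ' :: rest).dropWhile (· == ' ') = rest.dropWhile (· == ' ') := by
        simp [List.dropWhile]
      rw [hd]
      have hle : (rest.dropWhile (· == ' ')).length ≤ rest.length :=
        List.length_dropWhile_le _ _
      have harith : (' ' :: rest).length - (rest.dropWhile (· == ' ')).length
          = 1 + (rest.length - (rest.dropWhile (· == ' ')).length) := by
        simp only [List.length_cons]; omega
      have hne : (' ' :: rest).length - (rest.dropWhile (· == ' ')).length ≠ 0 := by
        simp only [List.length_cons]; omega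
      by_cases he : rest.dropWhile (· == ' ') = []
      · simp [he]
      · rw [if_neg (not_or.mpr ⟨hne, he⟩), if_neg he, harith]
    · have hcb : (c == ' ') = false := beq_eq_false_iff_ne.mpr hc
      have step : S002_loop (c :: rest) 0 0 false = S002_loop rest 1 0 false := by
        simp [S002_loop, hc]
      rw [step, S002_loop_false rest 1 0 one_ne_zero]
      have hd : (c :: rest).dropWhile (· == ' ') = c :: rest := by
        simp [List.dropWhile, hcb]
      rw [hd]
      simp
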